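-- pv_equiv track=rewrite | github.com/alexrwmt/apple_notes_export2 | apple-notes-export.py | parse_applescript_output
-- ===== SOURCE A (Python) =====
-- def parse_applescript_output(output):
--     """
--     Парсит вывод AppleScript и преобразует его в список словарей
--     """
--     notes = []
--     lines = output.strip().split('\n')
--
--     current_note = None
--     for line in lines:
--         line = line.strip()
--         if line.startswith('title:'):
--             # Если есть предыдущая заметка, добавляем её в список
--             if current_note:
--                 notes.append(current_note)
--             # Создаем новую заметку
--             current_note = {
--                 'title': line[6:].strip(),
--                 'content': ''
--             }
--         elif line.startswith('content:') and current_note is not None: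
--             # Добавляем контент к текущей заметке
--             current_note['content'] = line[8:].strip()
--
--     # Добавляем последнюю заметку
--     if current_note:
--         notes.append(current_note)
--
--     return notes
-- ===== SOURCE B (Python) =====
-- def _span_nontitle(lines):
--     """Split lines into (prefix before first 'title:' line, rest from that line on)."""
--     for k, l in enumerate(lines):
--         if l.startswith('title:'):
--             return lines[:k], lines[k:]
--     return lines, []
--
--
-- def parse_applescript_output(output):
--     stripped = [l.strip() for l in output.strip().split('\n')]
--     _, rest = _span_nontitle(stripped)  # lines before the first title are dropped
--     notes = []
--     while rest:
--         header, tail = rest[0], rest[1:]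
--         block, rest = _span_nontitle(tail)
--         content = ''
--         for l in block:
--             if l.startswith('content:'):
--                 content = l[8:].strip()
--         notes.append({'title': header[6:].strip(), 'content': content})
--     return notes
-- ===== Notes on version B (the rewrite author's own statement) =====
-- stated objective: alternative
-- what changed: A threads a mutable current_note through one stateful loop; B first segments the stripped lines into blocks at each 'title:' line (dropping pre-title lines) and then maps each block to a note, taking the last 'content:' line (default '').
import Mathlib
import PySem

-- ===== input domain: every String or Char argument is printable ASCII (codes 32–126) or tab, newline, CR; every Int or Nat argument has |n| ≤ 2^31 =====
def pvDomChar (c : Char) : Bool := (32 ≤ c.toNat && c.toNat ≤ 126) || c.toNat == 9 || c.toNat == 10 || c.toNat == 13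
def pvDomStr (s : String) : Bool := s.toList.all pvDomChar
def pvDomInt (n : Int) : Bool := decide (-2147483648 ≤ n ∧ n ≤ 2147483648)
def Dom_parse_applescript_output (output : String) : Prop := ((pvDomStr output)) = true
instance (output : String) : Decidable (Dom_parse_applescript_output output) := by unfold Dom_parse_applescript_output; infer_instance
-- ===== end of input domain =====

-- B replaces A's single stateful loop (mutable current_note) by a two-phase decomposition:
-- segment the stripped lines into blocks starting at each 'title:' line, then map each block
-- to a note (last 'content:' line wins, default ''). Same cost; objective: alternative structure.

-- ===== PORT A =====
-- Python dict assignment d[k] = v on an association list (overwrite keeps position, new key appends);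
-- exact for dicts without duplicate keys, which is all A ever builds.
def pvDictSet (d : List (String × String)) (k v : String) : List (String × String) :=
  if d.any (fun p => p.1 = k) then d.map (fun p => if p.1 = k then (k, v) else p)
  else d ++ [(k, v)]

-- the loop body acting on the already-stripped line (A does `line = line.strip()` first)
def pvA_line (st : List (List (String × String)) × Option (List (String × String)))
    (line : String) : List (List (String × String)) × Option (List (String × String)) :=
  if PySem.Str.startswith line "title:" then
    ((match st.2 with
      | some d => if d.isEmpty then st.1 else st.1 ++ [d]   -- `if current_note:` (dict truthiness)
      | none => st.1),
     some [("title", PySem.Str.strip (PySem.Str.slice line (some 6) none)), ("content", "")])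
  else if PySem.Str.startswith line "content:" && st.2.isSome then
    (st.1, st.2.map (fun d => pvDictSet d "content" (PySem.Str.strip (PySem.Str.slice line (some 8) none))))
  else st

def pvA_step (st : List (List (String × String)) × Option (List (String × String)))
    (line0 : String) : List (List (String × String)) × Option (List (String × String)) :=
  pvA_line st (PySem.Str.strip line0)

-- finalisation of A's loop state (the trailing `if current_note: notes.append(...)`)
def pvFin (st : List (List (String × String)) × Option (List (String × String))) :
    List (List (String × String)) :=
  match st.2 with
  | some d => if d.isEmpty then st.1 else st.1 ++ [d]
  | none => st.1

def parse_applescript_output (output : String) : List (List (String × String)) :=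
  let lines := ((PySem.Str.split? (PySem.Str.strip output) "\n").getD [])
  pvFin (lines.foldl pvA_step ([], none))

-- ===== PORT B =====
-- port of _span_nontitle: split at the first line starting with 'title:'
def pvSpanNontitle : List String → List String × List String
  | [] => ([], [])
  | l :: t =>
    if PySem.Str.startswith l "title:" then ([], l :: t)
    else (l :: (pvSpanNontitle t).1, (pvSpanNontitle t).2)

-- the inner `for l in block:` loop computing the content
def pvContent (block : List String) : String :=
  block.foldl
    (fun c l => if PySem.Str.startswith l "content:"
                then PySem.Str.strip (PySem.Str.slice l (some 8) none) else c) ""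

def pvNote (header : String) (block : List String) : List (String × String) :=
  [("title", PySem.Str.strip (PySem.Str.slice header (some 6) none)), ("content", pvContent block)]

theorem pvSpanNontitle_len (t : List String) : (pvSpanNontitle t).2.length ≤ t.length := by
  induction t with
  | nil => simp [pvSpanNontitle]
  | cons l t ih =>
    simp only [pvSpanNontitle]
    split
    · simp
    · simpa using Nat.le_succ_of_le ih

-- the `while rest:` loop of B
def pvBlocks : List String → List (List (String × String))
  | [] => []
  | h :: t =>
    let p := pvSpanNontitle t
    pvNote h p.1 :: pvBlocks p.2
termination_by ls => ls.length
decreasing_by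
  exact Nat.lt_succ_of_le (pvSpanNontitle_len t)

def parse_applescript_output_alt (output : String) : List (List (String × String)) :=
  let stripped := (((PySem.Str.split? (PySem.Str.strip output) "\n").getD [])).map PySem.Str.strip
  pvBlocks (pvSpanNontitle stripped).2

-- ===== PRECONDITION & SPEC =====
def Spec_parse_applescript_output (output : String) (out : List (List (String × String))) : Prop := out = parse_applescript_output_alt output
instance (output : String) (out : List (List (String × String))) : Decidable (Spec_parse_applescript_output output out) := by unfold Spec_parse_applescript_output; infer_instance

-- ===== CLAIM (what is proved, stated in full; the proofs are below) =====
def Claim_equal_parse_applescript_output : Prop := ∀ (output : String), Dom_parse_applescript_output output → Spec_parse_applescript_output output (parse_applescript_output output)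

-- ===== LEMMAS AND PROOFS =====

-- the content fold started from an arbitrary accumulator (pvContent = pvContFold "")
def pvContFold (c : String) (blk : List String) : String :=
  blk.foldl
    (fun c l => if PySem.Str.startswith l "content:"
                then PySem.Str.strip (PySem.Str.slice l (some 8) none) else c) c

theorem pvContent_eq (blk : List String) : pvContent blk = pvContFold "" blk := rfl

theorem pvDictSet_content (t c x : String) :
    pvDictSet [("title", t), ("content", c)] "content" x = [("title", t), ("content", x)] := by
  simp [pvDictSet]

theorem pvBlocks_cons (l : String) (t : List String) :
    pvBlocks (l :: t) = pvNote l (pvSpanNontitle t).1 :: pvBlocks (pvSpanNontitle t).2 := by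
  rw [pvBlocks]

theorem pvSpan_title {l : String} (t : List String)
    (h : PySem.Str.startswith l "title:" = true) : pvSpanNontitle (l :: t) = ([], l :: t) := by
  rw [pvSpanNontitle, if_pos h]

theorem pvSpan_not {l : String} (t : List String)
    (h : ¬ PySem.Str.startswith l "title:" = true) :
    pvSpanNontitle (l :: t) = (l :: (pvSpanNontitle t).1, (pvSpanNontitle t).2) := by
  rw [pvSpanNontitle, if_neg h]

-- the shared invariant: running A's loop from either kind of state produces acc ++ B's blocks
theorem pvMain (ys : List String) :
    (∀ acc, pvFin (ys.foldl pvA_line (acc, none)) = acc ++ pvBlocks (pvSpanNontitle ys).2) ∧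
    (∀ acc t c, pvFin (ys.foldl pvA_line (acc, some [("title", t), ("content", c)])) =
      acc ++ [("title", t), ("content", pvContFold c (pvSpanNontitle ys).1)] ::
        pvBlocks (pvSpanNontitle ys).2) := by
  induction ys with
  | nil =>
    refine ⟨fun acc => ?_, fun acc t c => ?_⟩
    · simp [pvFin, pvSpanNontitle, pvBlocks]
    · simp [pvFin, pvContFold, pvSpanNontitle, pvBlocks]
  | cons l ysT ih =>
    refine ⟨fun acc => ?_, fun acc t c => ?_⟩
    · by_cases h1 : PySem.Str.startswith l "title:" = true
      · simp only [List.foldl_cons, pvA_line, h1, if_true]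
        rw [ih.2, pvSpan_title ysT h1, pvBlocks_cons]
        simp [pvNote, pvContent_eq]
      · simp only [List.foldl_cons, pvA_line, h1, if_false, Bool.false_eq_true,
          Option.isSome_none, Bool.and_false]
        rw [ih.1, pvSpan_not ysT h1]
    · by_cases h1 : PySem.Str.startswith l "title:" = true
      · simp only [List.foldl_cons, pvA_line, h1, if_true, List.isEmpty_cons, Bool.false_eq_true,
          if_false]
        rw [ih.2, pvSpan_title ysT h1, pvBlocks_cons]
        simp [pvNote, pvContent_eq, pvContFold]
      · by_cases h2 : PySem.Str.startswith l "content:" = true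
        · simp only [List.foldl_cons, pvA_line, h1, h2, Bool.false_eq_true, if_false,
            Option.isSome_some, Bool.and_true, if_true, Option.map_some, pvDictSet_content]
          rw [ih.2, pvSpan_not ysT h1]
          simp only [pvContFold, List.foldl_cons, h2, if_true]
        · simp only [List.foldl_cons, pvA_line, h1, h2, Bool.false_eq_true, if_false,
            Option.isSome_some, Bool.and_true]
          rw [ih.2, pvSpan_not ysT h1]
          simp only [pvContFold, List.foldl_cons, h2, Bool.false_eq_true, if_false]

-- assembling the two ports: A's stateful fold equals B's segment-then-map pipeline
theorem pvAB (ls : List String) :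
    pvFin (List.foldl pvA_step ([], none) ls) =
      pvBlocks (pvSpanNontitle (ls.map PySem.Str.strip)).2 := by
  show pvFin (List.foldl (fun st y => pvA_line st (PySem.Str.strip y)) ([], none) ls) = _
  rw [← List.foldl_map]
  exact (pvMain _).1 []

-- ===== VERDICT (by name: the statement is the Claim_ definition above) =====
theorem parse_applescript_output_spec : Claim_equal_parse_applescript_output := by
  intro output _
  show parse_applescript_output output = parse_applescript_output_alt output
  exact pvAB ((PySem.Str.split? (PySem.Str.strip output) "\n").getD [])
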